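-- pv_equiv track=rewrite | github.com/sheyls/data-structures-algorithms | problems/loveletter.py | theLoveLetterMystery
-- ===== SOURCE A (Python) =====
-- def theLoveLetterMystery(s):
--
--     if len(s) < 2:
--         return 0
--
--     r = len(s) - 1
--     l = 0
--
--     def reduce(big, lit):
--         count = 0
--         while big > lit:
--             big -= 1
--             count += 1
--         return count
--
--     total_count = 0
--
--     while r > l:
--         lc = ord(s[l])
--         rc = ord(s[r])
--
--         if lc > rc:
--             total_count += reduce(lc, rc)
--         elif lc < rc:
--             total_count += reduce(rc, lc)
--
--         r -= 1
--         l += 1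
--
--     return total_count
-- ===== SOURCE B (Python) =====
-- def theLoveLetterMystery(s):
--     # Pair the string with its own reversal: every mirrored pair is counted
--     # twice (and a middle character pairs with itself, contributing 0),
--     # so the total cost is half the summed absolute ordinal differences.
--     return sum(abs(ord(a) - ord(b)) for a, b in zip(s, reversed(s))) // 2
-- ===== Notes on version B (the rewrite author's own statement) =====
-- stated objective: simpler
-- what changed: B pairs the string with its own reversal via zip and returns half the summed closed-form |ord differences| (each mirrored pair is counted twice, a middle char contributes 0), instead of A's two-pointer half-walk with an inner one-step decrement-counting loop.
import Mathlib
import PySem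

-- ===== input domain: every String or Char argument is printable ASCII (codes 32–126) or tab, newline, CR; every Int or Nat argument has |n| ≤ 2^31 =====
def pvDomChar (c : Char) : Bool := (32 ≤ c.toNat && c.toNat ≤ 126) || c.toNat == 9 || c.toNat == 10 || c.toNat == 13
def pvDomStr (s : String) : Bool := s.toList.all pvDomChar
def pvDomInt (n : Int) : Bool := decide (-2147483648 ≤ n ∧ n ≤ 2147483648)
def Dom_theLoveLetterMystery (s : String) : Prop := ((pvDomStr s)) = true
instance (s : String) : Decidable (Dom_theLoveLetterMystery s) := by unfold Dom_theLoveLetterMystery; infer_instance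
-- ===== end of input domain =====

-- B pairs the string with its own reversal and halves the summed |ord differences| (each mirrored pair counted twice, a middle char contributing 0), replacing A's two-pointer walk with its step-by-step decrement counter (simpler).


-- ===== PORT A =====
-- the inner helper `reduce`: counts single decrements of big down to lit
def pvReduceA (big lit count : Int) : Int :=
  if big > lit then pvReduceA (big - 1) lit (count + 1) else count
termination_by (big - lit).toNat
decreasing_by omega

-- the outer `while r > l` loop (indices are always in range, so getD is exact)
def pvLoopA (cs : List Char) (l r : Nat) (total : Int) : Int :=
  if r > l then
    let lc : Int := (cs.getD l ' ').toNat
    let rc : Int := (cs.getD r ' ').toNat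
    let total :=
      if lc > rc then total + pvReduceA lc rc 0
      else if lc < rc then total + pvReduceA rc lc 0
      else total
    pvLoopA cs (l + 1) (r - 1) total
  else total
termination_by r - l

def theLoveLetterMystery (s : String) : Int :=
  if s.toList.length < 2 then 0
  else pvLoopA s.toList 0 (s.toList.length - 1) 0

-- ===== PORT B =====
-- zip(s, reversed(s)): sum all |ord(a) - ord(b)| over the full pairing, then // 2
def theLoveLetterMystery_alt (s : String) : Int :=
  let cs := s.toList
  PySem.Int.floordiv
    (((cs.zip cs.reverse).map
        (fun p => |((p.1.toNat : Int)) - ((p.2.toNat : Int))|)).sum) 2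

-- ===== PRECONDITION & SPEC =====
def Spec_theLoveLetterMystery (s : String) (out : Int) : Prop := out = theLoveLetterMystery_alt s
instance (s : String) (out : Int) : Decidable (Spec_theLoveLetterMystery s out) := by unfold Spec_theLoveLetterMystery; infer_instance

-- ===== CLAIM (what is proved, stated in full; the proofs are below) =====
def Claim_equal_theLoveLetterMystery : Prop := ∀ (s : String), Dom_theLoveLetterMystery s → Spec_theLoveLetterMystery s (theLoveLetterMystery s)

-- ===== LEMMAS AND PROOFS =====

theorem pvReduceA_eq (k : Nat) : ∀ (big lit c : Int), (big - lit).toNat = k →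
    pvReduceA big lit c = c + max (big - lit) 0 := by
  induction k with
  | zero =>
    intro big lit c hk
    rw [pvReduceA]
    have : ¬ big > lit := by omega
    simp [this]; omega
  | succ m ih =>
    intro big lit c hk
    rw [pvReduceA]
    have h : big > lit := by omega
    simp [h]
    rw [ih (big - 1) lit (c + 1) (by omega)]
    omega

-- A's loop computes the half-sum of mirrored |ord differences|
theorem pvLoopA_eq (cs : List Char) (j : Nat) : ∀ (l : Nat) (t : Int),
    cs.length / 2 - l = j →
    pvLoopA cs l (cs.length - 1 - l) t =
      t + ((List.range' l j).map (fun i =>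
        |((cs.getD i ' ').toNat : Int) - ((cs.getD (cs.length - 1 - i) ' ').toNat : Int)|)).sum := by
  induction j with
  | zero =>
    intro l t hj
    rw [pvLoopA]
    have : ¬ cs.length - 1 - l > l := by omega
    simp [this]
  | succ m ih =>
    intro l t hj
    have hl : l < cs.length / 2 := by omega
    have hcond : cs.length - 1 - l > l := by omega
    rw [pvLoopA]
    simp only [hcond, if_true]
    have hr : cs.length - 1 - l - 1 = cs.length - 1 - (l + 1) := by omega
    rw [hr, ih (l + 1) _ (by omega), List.range'_succ]
    simp only [List.map_cons, List.sum_cons]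
    set lc : Int := ((cs.getD l ' ').toNat : Int)
    set rc : Int := ((cs.getD (cs.length - 1 - l) ' ').toNat : Int)
    by_cases h1 : lc > rc
    · simp only [h1, if_true]
      rw [pvReduceA_eq ((lc - rc).toNat) lc rc 0 rfl]
      have : |lc - rc| = lc - rc := abs_of_pos (by omega)
      omega
    · simp only [h1, if_false]
      by_cases h2 : lc < rc
      · simp only [h2, if_true]
        rw [pvReduceA_eq ((rc - lc).toNat) rc lc 0 rfl]
        have : |lc - rc| = rc - lc := by rw [abs_sub_comm]; exact abs_of_pos (by omega)
        omega
      · simp only [h2, if_false]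
        have hz : lc = rc := by omega
        rw [hz]
        simp

-- B's zip with the reversal, written as a map over all indices
theorem zip_reverse_map_eq (cs : List Char) (f : Char × Char → Int) :
    (cs.zip cs.reverse).map f =
      (List.range cs.length).map
        (fun i => f (cs.getD i ' ', cs.getD (cs.length - 1 - i) ' ')) := by
  apply List.ext_getElem
  · simp
  · intro i h1 h2
    have hi : i < cs.length := by simpa using h2
    simp only [List.getElem_map, List.getElem_zip, List.getElem_range, List.getElem_reverse]
    rw [List.getD_eq_getElem _ _ hi, List.getD_eq_getElem _ _ (by omega)]

-- bridge: a list-sum over List.range is the Finset.range sum (no library lemma closes this directly)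
theorem sum_map_range_eq_finset (n : Nat) (g : Nat → Int) :
    ((List.range n).map g).sum = ∑ i ∈ Finset.range n, g i := by
  induction n with
  | zero => simp
  | succ m ih => rw [List.range_succ, Finset.sum_range_succ, List.map_append, List.sum_append, ih]; simp

-- a mirror-symmetric sum over all n indices is twice the sum over the first half
theorem sum_range_symm_halve (n : Nat) (g : Nat → Int)
    (hsym : ∀ i, i < n → g i = g (n - 1 - i))
    (hmid : n % 2 = 1 → g (n / 2) = 0) :
    ∑ i ∈ Finset.range n, g i = 2 * ∑ i ∈ Finset.range (n / 2), g i := by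
  have hn : n = n / 2 + (n - n / 2) := by omega
  rw [hn, Finset.sum_range_add]
  nth_rewrite 1 [← hn]
  have hsecond : ∑ i ∈ Finset.range (n - n / 2), g (n / 2 + i)
      = ∑ i ∈ Finset.range (n - n / 2), g ((n - n / 2) - 1 - i) := by
    apply Finset.sum_congr rfl
    intro i hi
    simp only [Finset.mem_range] at hi
    rw [hsym (n / 2 + i) (by omega)]
    congr 1
    omega
  rw [hsecond, Finset.sum_range_reflect]
  by_cases hpar : n % 2 = 0
  · have : n - n / 2 = n / 2 := by omega
    rw [this]; ring
  · have hodd : n % 2 = 1 := by omega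
    have : n - n / 2 = n / 2 + 1 := by omega
    rw [this, Finset.sum_range_succ, hmid hodd]
    ring

-- ===== VERDICT (by name: the statement is the Claim_ definition above) =====
theorem theLoveLetterMystery_spec : Claim_equal_theLoveLetterMystery := by
  intro s _
  unfold Spec_theLoveLetterMystery theLoveLetterMystery theLoveLetterMystery_alt
  dsimp only
  set cs := s.toList with hcs
  set n := cs.length with hn
  set g : Nat → Int := fun i =>
    |((cs.getD i ' ').toNat : Int) - ((cs.getD (n - 1 - i) ' ').toNat : Int)| with hg
  have hsym : ∀ i, i < n → g i = g (n - 1 - i) := by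
    intro i hi
    simp only [hg]
    have : n - 1 - (n - 1 - i) = i := by omega
    rw [this, abs_sub_comm]
  have hmid : n % 2 = 1 → g (n / 2) = 0 := by
    intro hodd
    simp only [hg]
    have : n - 1 - n / 2 = n / 2 := by omega
    rw [this]
    simp
  -- evaluate B
  have hB : (((cs.zip cs.reverse).map
        (fun p => |((p.1.toNat : Int)) - ((p.2.toNat : Int))|)).sum)
      = 2 * ∑ i ∈ Finset.range (n / 2), g i := by
    rw [zip_reverse_map_eq cs (fun p => |((p.1.toNat : Int)) - ((p.2.toNat : Int))|)]
    calc ((List.range cs.length).map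
            (fun i => |((cs.getD i ' ').toNat : Int) - ((cs.getD (cs.length - 1 - i) ' ').toNat : Int)|)).sum
        = ((List.range n).map g).sum := rfl
      _ = ∑ i ∈ Finset.range n, g i := sum_map_range_eq_finset n g
      _ = 2 * ∑ i ∈ Finset.range (n / 2), g i := sum_range_symm_halve n g hsym hmid
  rw [hB, PySem.Int.floordiv_eq_ediv_of_pos (by omega)]
  have h2 : (2 : Int) * (∑ i ∈ Finset.range (n / 2), g i) / 2 = ∑ i ∈ Finset.range (n / 2), g i :=
    Int.mul_ediv_cancel_left _ (by omega)
  rw [h2]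
  -- evaluate A
  by_cases h : n < 2
  · have h2' : n / 2 = 0 := by omega
    rw [if_pos h, h2']
    simp
  · rw [if_neg h]
    have := pvLoopA_eq cs (n / 2) 0 0 (by omega)
    simp only [Nat.sub_zero] at this
    rw [this, ← List.range_eq_range', zero_add]
    exact sum_map_range_eq_finset (n / 2) g
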